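-- pv_equiv track=rewrite | github.com/teodoraalexandra/Fundamental-Of-Programming | Assignment 1-3/Problem_13.py | generateTheNthElementOfTheSequence
-- ===== SOURCE A (Python) =====
-- def isPrime(a):
--     if a <= 1:
--         return False
--     if a == 2:
--         return True
--     for i in range(2, a):   #from 2 to a we check every number to see if it is a possible divisor
--         if (a % i == 0):
--             return False   #if we find a divisor, the number is not prime
--     return True
--
-- def nextPrimeDiv(n, d):
--     next = d + 1
--     while (isPrime(next) == False or n % next != 0) and next <= n:
--         next = next + 1
--     if next <= n:
--         return next
--     else:
--         return -1
--
-- def generateTheNthElementOfTheSequence(k):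
--     number = 2
--     element = 1
--     if k == 1:
--         return 1
--     else:
--         k = k-1
--     while k:
--         while element != -1 and k and element <= number:
--             element = nextPrimeDiv(number, element)
--             if element != -1:
--                 k = k - 1
--             if k == 0:
--                 return element
--
--         number = number + 1
--         element = 1
-- ===== SOURCE B (Python) =====
-- def generateTheNthElementOfTheSequence(k):
--     # Trial-division factorization of each n = 2,3,4,...: divide out each
--     # found factor, so every emitted divisor is automatically prime; count to k.
--     if k == 1:
--         return 1
--     remaining = k - 1
--     n = 2
--     while True:
--         p = 2
--         m = n
--         while p <= m:
--             if m % p == 0: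
--                 remaining -= 1
--                 if remaining == 0:
--                     return p
--                 while m % p == 0:
--                     m //= p
--             p += 1
--         n += 1
-- ===== Notes on version B (the rewrite author's own statement) =====
-- stated objective: faster
-- what changed: A finds each successive prime divisor of n by scanning every candidate and testing its primality with full O(candidate) trial division; B factorizes each n in one pass of trial division that divides each found factor out, so emitted divisors are prime with no primality test at all.
import Mathlib
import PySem

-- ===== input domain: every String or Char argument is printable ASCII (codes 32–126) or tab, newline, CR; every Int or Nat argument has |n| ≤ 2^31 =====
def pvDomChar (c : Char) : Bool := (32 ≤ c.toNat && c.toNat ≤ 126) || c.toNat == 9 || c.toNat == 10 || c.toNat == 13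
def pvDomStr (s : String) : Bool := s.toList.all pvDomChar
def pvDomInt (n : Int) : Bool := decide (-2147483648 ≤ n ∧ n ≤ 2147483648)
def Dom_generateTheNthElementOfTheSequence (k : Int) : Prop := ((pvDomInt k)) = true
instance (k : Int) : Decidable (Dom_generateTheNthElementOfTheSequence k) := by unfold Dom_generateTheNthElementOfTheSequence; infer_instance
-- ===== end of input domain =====

-- B replaces A's per-candidate primality testing with one-pass trial-division
-- factorization (dividing each found factor out), an asymptotically faster algorithm.
-- While-loops are ported with a fuel argument proved sufficient by the lemmas below;
-- running out of fuel is unreachable on the claimed domain (Python diverges on k ≤ 0,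
-- which Pre_ excludes).

-- ===== PORT A =====

-- for i in range(2, a): if a % i == 0: return False
def isPrimeLoopA (a : Int) : List Int → Bool
  | [] => true
  | i :: rest => if PySem.Int.mod a i = 0 then false else isPrimeLoopA a rest

def isPrimeA (a : Int) : Bool :=
  if a ≤ 1 then false
  else if a = 2 then true
  else isPrimeLoopA a (PySem.List.pyRange 2 a 1)

-- while (isPrime(next) == False or n % next != 0) and next <= n: next = next + 1
-- followed by: return next if next <= n else -1
def nPDLoop (n next : Int) (fuel : Nat) : Int :=
  match fuel with
  | 0 => if next ≤ n then next else -1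
  | fuel + 1 =>
    if ((!(isPrimeA next)) || (!(PySem.Int.mod n next == 0))) && (next ≤ n) then
      nPDLoop n (next + 1) fuel
    else if next ≤ n then next else -1

def nextPrimeDiv (n d : Int) : Int := nPDLoop n (d + 1) (n - d).toNat

-- inner while loop of A: returns .inl answer (early return) or .inr k (loop exited)
def innerA (num e k : Int) (fuel : Nat) : Sum Int Int :=
  match fuel with
  | 0 => .inr k
  | fuel + 1 =>
    if e ≠ -1 ∧ k ≠ 0 ∧ e ≤ num then
      -- element = nextPrimeDiv(number, element); if element != -1: k -= 1; if k == 0: return element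
      if nextPrimeDiv num e ≠ -1 then
        if k - 1 = 0 then .inl (nextPrimeDiv num e)
        else innerA num (nextPrimeDiv num e) (k - 1) fuel
      else innerA num (nextPrimeDiv num e) k fuel
    else .inr k

-- outer while loop of A.  Fuel = the remaining count k: each pass over a number
-- consumes at least one sequence element, so k iterations always suffice (proved
-- in the lemmas below); Python diverges on k ≤ 0, where fuel 0 is unreachable.
def outerA (fuel : Nat) (number k : Int) : Int :=
  match fuel with
  | 0 => 0
  | fuel + 1 =>
    match innerA number 1 k ((number + 1).toNat + 1) with
    | .inl a => a
    | .inr k' => outerA fuel (number + 1) k'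

def generateTheNthElementOfTheSequence (k : Int) : Int :=
  if k = 1 then 1 else outerA (k - 1).toNat 2 (k - 1)

-- ===== PORT B =====

-- while m % p == 0: m //= p   (guard 2 ≤ p ∧ 1 ≤ m holds at every call site)
def stripFac (p m : Int) (fuel : Nat) : Int :=
  match fuel with
  | 0 => m
  | fuel + 1 =>
    if 2 ≤ p ∧ 1 ≤ m ∧ PySem.Int.mod m p = 0 then
      stripFac p (PySem.Int.floordiv m p) fuel
    else m

-- inner while loop of B over candidate divisors p
def innerB (p m rem : Int) (fuel : Nat) : Sum Int Int :=
  match fuel with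
  | 0 => .inr rem
  | fuel + 1 =>
    if p ≤ m then
      if PySem.Int.mod m p = 0 then
        if rem - 1 = 0 then .inl p
        else innerB (p + 1) (stripFac p m m.toNat) (rem - 1) fuel
      else innerB (p + 1) m rem fuel
    else .inr rem

-- outer while loop of B (same fuel discipline as outerA)
def outerB (fuel : Nat) (n rem : Int) : Int :=
  match fuel with
  | 0 => 0
  | fuel + 1 =>
    match innerB 2 n rem ((n + 1).toNat) with
    | .inl p => p
    | .inr rem' => outerB fuel (n + 1) rem'

def generateTheNthElementOfTheSequence_alt (k : Int) : Int :=
  if k = 1 then 1 else outerB (k - 1).toNat 2 (k - 1)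

-- ===== PRECONDITION & SPEC =====
-- Pre_ excludes k ≤ 0, on which Python A never returns (its while-loop runs forever).
def Pre_generateTheNthElementOfTheSequence (k : Int) : Prop := 1 ≤ k
instance (k : Int) : Decidable (Pre_generateTheNthElementOfTheSequence k) := by
  unfold Pre_generateTheNthElementOfTheSequence; infer_instance

def pvWitness_generateTheNthElementOfTheSequence : Int := 5

def Spec_generateTheNthElementOfTheSequence (k : Int) (out : Int) : Prop := out = generateTheNthElementOfTheSequence_alt k
instance (k : Int) (out : Int) : Decidable (Spec_generateTheNthElementOfTheSequence k out) := by unfold Spec_generateTheNthElementOfTheSequence; infer_instance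

-- ===== CLAIM (what is proved, stated in full; the proofs are below) =====
def Claim_equal_generateTheNthElementOfTheSequence : Prop := ∀ (k : Int), Dom_generateTheNthElementOfTheSequence k → Pre_generateTheNthElementOfTheSequence k → Spec_generateTheNthElementOfTheSequence k (generateTheNthElementOfTheSequence k)

-- ===== LEMMAS AND PROOFS =====

-- result of nPDLoop is -1 or lies in [next, n]
theorem nPDLoop_bounds (fuel : Nat) : ∀ (n next : Int),
    nPDLoop n next fuel = -1 ∨ (next ≤ nPDLoop n next fuel ∧ nPDLoop n next fuel ≤ n) := by
  induction fuel with
  | zero =>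
      intro n next
      rw [nPDLoop]
      split
      · exact Or.inr ⟨le_refl _, by assumption⟩
      · exact Or.inl rfl
  | succ fuel ih =>
      intro n next
      rw [nPDLoop]
      split
      · rcases ih n (next + 1) with h1 | h1
        · exact Or.inl h1
        · exact Or.inr ⟨by omega, h1.2⟩
      · split
        · exact Or.inr ⟨le_refl _, by assumption⟩
        · exact Or.inl rfl

theorem nPD_bounds (n d : Int) :
    nextPrimeDiv n d = -1 ∨ (d + 1 ≤ nextPrimeDiv n d ∧ nextPrimeDiv n d ≤ n) :=
  nPDLoop_bounds (n - d).toNat n (d + 1)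

-- the list of values A's inner loop successively assigns to `element` (all ≠ -1)
def chainA (num e : Int) : List Int :=
  if h : nextPrimeDiv num e ≠ -1 then
    nextPrimeDiv num e :: chainA num (nextPrimeDiv num e)
  else []
termination_by (num + 2 - e).toNat
decreasing_by
  rcases nPD_bounds num e with h' | h'
  · exact absurd h' h
  · omega

-- generic "k-th element or leftover count" consumer shared by the two proofs
def consumeL : List Int → Int → Sum Int Int
  | [], k => .inr k
  | x :: t, k => if k - 1 = 0 then .inl x else consumeL t (k - 1)

-- integers (d, n] in increasing order
def myRange (d n : Int) : List Int :=
  if h : d < n then (d + 1) :: myRange (d + 1) n else []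
termination_by (n - d).toNat
decreasing_by omega

def predP (n x : Int) : Bool := isPrimeA x && (PySem.Int.mod n x == 0)

theorem isPrimeA_two_le {a : Int} (h : isPrimeA a = true) : 2 ≤ a := by
  unfold isPrimeA at h
  split at h
  · exact absurd h (by simp)
  · omega

theorem mem_myRange {d n x : Int} : x ∈ myRange d n ↔ d < x ∧ x ≤ n := by
  fun_induction myRange d n with
  | case1 d h ih => simp [ih]; omega
  | case2 d h => simp; omega

theorem consumeL_inr {L : List Int} {k k' : Int} (hk : 1 ≤ k)
    (h : consumeL L k = .inr k') : k' = k - L.length ∧ 1 ≤ k' := by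
  induction L generalizing k with
  | nil => simp [consumeL] at h; simp [h]; omega
  | cons x t ih =>
      rw [consumeL] at h
      split at h
      · exact absurd h (by simp)
      · have := ih (k := k - 1) (by omega) h
        simp; omega

theorem isPrimeLoopA_iff (a : Int) (l : List Int) :
    isPrimeLoopA a l = true ↔ ∀ i ∈ l, PySem.Int.mod a i ≠ 0 := by
  induction l with
  | nil => simp [isPrimeLoopA]
  | cons i rest ih =>
      rw [isPrimeLoopA]
      split
      · simp only [Bool.false_eq_true, false_iff]
        intro hall
        exact hall i (List.mem_cons_self) (by assumption)
      · rw [ih]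
        constructor
        · intro hall j hj
          rcases List.mem_cons.mp hj with rfl | hmem
          · assumption
          · exact hall j hmem
        · intro hall j hj
          exact hall j (List.mem_cons_of_mem _ hj)

theorem isPrimeA_iff (a : Int) (ha : 2 ≤ a) :
    isPrimeA a = true ↔ ∀ j : Int, 2 ≤ j → j < a → ¬ j ∣ a := by
  unfold isPrimeA
  rw [if_neg (by omega)]
  by_cases h2 : a = 2
  · subst h2; simp; intro j h1 h2 _; omega
  · rw [if_neg h2, isPrimeLoopA_iff]
    constructor
    · intro hall j hj1 hj2 hdvd
      exact hall j (PySem.List.mem_pyRange_one.mpr ⟨hj1, hj2⟩)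
        ((PySem.Int.mod_eq_zero_iff_dvd a j).mpr hdvd)
    · intro hall j hj
      obtain ⟨hj1, hj2⟩ := PySem.List.mem_pyRange_one.mp hj
      intro hmod
      exact hall j hj1 hj2 ((PySem.Int.mod_eq_zero_iff_dvd a j).mp hmod)

theorem isPrimeA_iff_prime (a : Int) (ha : 2 ≤ a) :
    isPrimeA a = true ↔ Nat.Prime a.toNat := by
  rw [isPrimeA_iff a ha, Nat.prime_def_lt]
  constructor
  · intro hall
    refine ⟨by omega, ?_⟩
    intro m hm hdvd
    by_contra hm1
    have hm0 : m ≠ 0 := by rintro rfl; simp at hdvd; omega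
    have : ¬ ((m : Int) ∣ a) := hall m (by omega) (by omega)
    exact this (by rw [show a = ((a.toNat : Int)) by omega]; exact_mod_cast hdvd)
  · intro ⟨h2, hall⟩ j hj1 hj2 hdvd
    have : j.toNat ∣ a.toNat := by
      have : (j.toNat : Int) ∣ (a.toNat : Int) := by
        rw [Int.toNat_of_nonneg (by omega), Int.toNat_of_nonneg (by omega)]; exact hdvd
      exact_mod_cast this
    have := hall j.toNat (by omega) this
    omega


-- one-step unfoldings of nextPrimeDiv
theorem nPD_hit {n d : Int} (hle : d + 1 ≤ n) (hp : predP n (d + 1) = true) :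
    nextPrimeDiv n d = d + 1 := by
  simp only [predP, Bool.and_eq_true, beq_iff_eq] at hp
  rw [nextPrimeDiv, show (n - d).toNat = ((n - d).toNat - 1) + 1 by omega, nPDLoop,
    if_neg (by simp [hp.1, hp.2])]
  exact if_pos hle

theorem nPD_miss {n d : Int} (hle : d + 1 ≤ n) (hp : ¬ predP n (d + 1) = true) :
    nextPrimeDiv n d = nextPrimeDiv n (d + 1) := by
  rw [nextPrimeDiv, nextPrimeDiv, show (n - d).toNat = (n - (d + 1)).toNat + 1 by omega,
    nPDLoop, if_pos ?_]
  simp only [predP, Bool.and_eq_true, beq_iff_eq, not_and] at hp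
  simp only [Bool.and_eq_true, Bool.or_eq_true, Bool.not_eq_true', decide_eq_true_eq]
  refine ⟨?_, hle⟩
  cases hb : isPrimeA (d + 1)
  · exact Or.inl rfl
  · right
    simp only [beq_eq_false_iff_ne, ne_eq]
    exact hp hb

theorem nPD_out {n d : Int} (hgt : ¬ (d + 1 ≤ n)) : nextPrimeDiv n d = -1 := by
  rw [nextPrimeDiv, show (n - d).toNat = 0 by omega, nPDLoop, if_neg hgt]

theorem innerA_eq_consume (num e k : Int) (he : e ≠ -1) (hk : k ≠ 0) :
    ∀ fuel : Nat, (num + 2 - e).toNat + 1 ≤ fuel →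
    innerA num e k fuel = consumeL (chainA num e) k := by
  fun_induction chainA num e generalizing k with
  | case1 e h ih =>
      intro fuel hfuel
      have hb : 1 + e ≤ nextPrimeDiv num e ∧ nextPrimeDiv num e ≤ num := by
        rcases nPD_bounds num e with h' | h'
        · exact absurd h' h
        · omega
      rw [show fuel = (fuel - 1) + 1 by omega, innerA, if_pos ⟨he, hk, by omega⟩,
        if_pos h, consumeL]
      split
      · rfl
      · exact ih (k - 1) h (by assumption) (fuel - 1) (by omega)
  | case2 e h =>
      intro fuel hfuel
      have h' : nextPrimeDiv num e = -1 := by by_contra hc; exact h hc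
      rw [consumeL]
      by_cases hle : e ≤ num
      · rw [show fuel = ((fuel - 2) + 1) + 1 by omega, innerA, if_pos ⟨he, hk, hle⟩,
          if_neg (by simp [h']), h', innerA, if_neg (by simp)]
      · rw [show fuel = (fuel - 1) + 1 by omega, innerA, if_neg (by tauto)]

-- chainA num 1 lists exactly the prime divisors of num in increasing order
theorem chainA_eq_filter (num d : Int) :
    chainA num d = (myRange d num).filter (predP num) := by
  fun_induction myRange d num with
  | case1 d h ih =>
      by_cases hp : predP num (d + 1) = true
      · have h2 : (2:Int) ≤ d + 1 :=
          isPrimeA_two_le (by simp only [predP, Bool.and_eq_true] at hp; exact hp.1)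
        rw [chainA, dif_pos (by rw [nPD_hit (by omega) hp]; omega),
            nPD_hit (by omega) hp, List.filter_cons, if_pos hp, ih]
      · have step : chainA num d = chainA num (d + 1) := by
          conv_lhs => rw [chainA]
          conv_rhs => rw [chainA]
          simp_rw [nPD_miss (by omega) hp]
        rw [step, ih, List.filter_cons, if_neg hp]
  | case2 d h =>
      rw [chainA, dif_neg (by simp [nPD_out (show ¬(d + 1 ≤ num) by omega)]),
          List.filter_nil]

theorem stripFac_le (p m : Int) : ∀ fuel : Nat, stripFac p m fuel ≤ m := by
  intro fuel
  induction fuel generalizing m with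
  | zero => rw [stripFac]
  | succ fuel ih =>
      rw [stripFac]
      split
      · rename_i h
        have hfl : PySem.Int.floordiv m p ≤ m := by
          rw [PySem.Int.floordiv_eq_ediv_of_pos (by omega)]
          have : m / p < m := by
            apply Int.ediv_lt_of_lt_mul (by omega)
            nlinarith [h.1, h.2.1]
          omega
        exact le_trans (ih (PySem.Int.floordiv m p)) hfl
      · exact le_refl m

theorem stripFac_spec (p m : Int) : ∀ fuel : Nat, 2 ≤ p → 1 ≤ m → m.toNat ≤ fuel →
    ∃ e : Nat, m = p ^ e * stripFac p m fuel ∧ 1 ≤ stripFac p m fuel ∧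
      PySem.Int.mod (stripFac p m fuel) p ≠ 0 := by
  intro fuel
  induction fuel generalizing m with
  | zero => intro hp hm hf; exact absurd hf (by omega)
  | succ fuel ih =>
      intro hp hm hf
      rw [stripFac]
      split
      · rename_i h
        have hdvd : p ∣ m := (PySem.Int.mod_eq_zero_iff_dvd m p).mp h.2.2
        have hfl : PySem.Int.floordiv m p = m / p :=
          PySem.Int.floordiv_eq_ediv_of_pos (by omega)
        have hmul : p * (m / p) = m := Int.mul_ediv_cancel' hdvd
        have hlt : m / p < m := by
          apply Int.ediv_lt_of_lt_mul (by omega)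
          nlinarith
        have hm2 : 1 ≤ PySem.Int.floordiv m p := by
          rw [hfl]
          nlinarith [hmul]
        obtain ⟨e, he1, he2, he3⟩ := ih (PySem.Int.floordiv m p) hp hm2 (by omega)
        refine ⟨e + 1, ?_, he2, he3⟩
        rw [pow_succ]
        calc m = p * PySem.Int.floordiv m p := by rw [hfl, hmul]
          _ = p * (p ^ e * stripFac p (PySem.Int.floordiv m p) fuel) := by rw [← he1]
          _ = p ^ e * p * stripFac p (PySem.Int.floordiv m p) fuel := by ring
      · rename_i h
        refine ⟨0, by ring, hm, ?_⟩
        intro hmod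
        exact h ⟨hp, hm, hmod⟩

-- the distinct divisors B's inner loop emits for the number m (starting at p)
def trailB (p m : Int) : List Int :=
  if h : p ≤ m then
    if PySem.Int.mod m p = 0 then p :: trailB (p + 1) (stripFac p m m.toNat)
    else trailB (p + 1) m
  else []
termination_by (m + 1 - p).toNat
decreasing_by
  · have := stripFac_le p m m.toNat; omega
  · omega

theorem innerB_eq_consume (p m rem : Int) (hr : rem ≠ 0) :
    ∀ fuel : Nat, (m + 1 - p).toNat ≤ fuel →
    innerB p m rem fuel = consumeL (trailB p m) rem := by
  fun_induction trailB p m generalizing rem with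
  | case1 p m h hd ih =>
      intro fuel hfuel
      rw [show fuel = (fuel - 1) + 1 by omega, innerB, if_pos h, if_pos hd, consumeL]
      split
      · rfl
      · refine ih (rem - 1) (by assumption) (fuel - 1) ?_
        have := stripFac_le p m m.toNat
        omega
  | case2 p m h hd ih =>
      intro fuel hfuel
      rw [show fuel = (fuel - 1) + 1 by omega, innerB, if_pos h, if_neg hd]
      exact ih rem hr (fuel - 1) (by omega)
  | case3 p m h =>
      intro fuel hfuel
      cases fuel with
      | zero => rw [innerB, consumeL]
      | succ fuel => rw [innerB, if_neg h, consumeL]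

theorem primeInt_of_isPrimeA {x : Int} (h : isPrimeA x = true) : Prime x := by
  have h2 : 2 ≤ x := isPrimeA_two_le h
  have hnp : Nat.Prime x.toNat := (isPrimeA_iff_prime x h2).mp h
  have := Nat.prime_iff_prime_int.mp hnp
  rwa [Int.toNat_of_nonneg (by omega)] at this

-- trial division emits exactly the prime divisors of n in (p-1, n]
theorem trailB_eq_filter (p m n : Int) (hp : 2 ≤ p) (hm : 1 ≤ m) (hn : 1 ≤ n)
    (hmn : m ∣ n)
    (hsmall : ∀ d : Int, 2 ≤ d → d < p → ¬ d ∣ m)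
    (hbig : ∀ x : Int, p ≤ x → isPrimeA x = true → (x ∣ n ↔ x ∣ m)) :
    trailB p m = (myRange (p - 1) n).filter (predP n) := by
  generalize hM : (n + 1 - p).toNat = M
  induction M generalizing p m with
  | zero =>
      have hpn : n < p := by omega
      have hmle : m ≤ n := Int.le_of_dvd (by omega) hmn
      rw [trailB, dif_neg (by omega)]
      symm
      rw [List.filter_eq_nil_iff]
      intro x hx
      rw [mem_myRange] at hx
      exact absurd rfl (by omega : ¬ x = x)
  | succ M ih =>
      have hnopred : ∀ x : Int, p ≤ x → predP n x = true → x ∣ m := by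
        intro x hx hpr
        simp only [predP, Bool.and_eq_true, beq_iff_eq] at hpr
        exact (hbig x hx hpr.1).mp ((PySem.Int.mod_eq_zero_iff_dvd n x).mp hpr.2)
      have hpn : p ≤ n := by omega
      have hrange : myRange (p - 1) n = p :: myRange p n := by
        rw [myRange, dif_pos (by omega), show p - 1 + 1 = p by ring]
      by_cases hpm : p ≤ m
      · by_cases hdv : PySem.Int.mod m p = 0
        · have hpdvdm : p ∣ m := (PySem.Int.mod_eq_zero_iff_dvd m p).mp hdv
          have hprime : isPrimeA p = true := by
            rw [isPrimeA_iff p hp]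
            intro j hj1 hj2 hjdvd
            exact hsmall j hj1 hj2 (hjdvd.trans hpdvdm)
          have hpred : predP n p = true := by
            simp only [predP, Bool.and_eq_true, hprime, true_and, beq_iff_eq]
            exact (PySem.Int.mod_eq_zero_iff_dvd n p).mpr (hpdvdm.trans hmn)
          obtain ⟨e, hse, hs1, hs3⟩ := stripFac_spec p m m.toNat hp (by omega) (le_refl _)
          have hsm : stripFac p m m.toNat ∣ m := by
            conv_rhs => rw [hse]
            exact dvd_mul_left _ _
          have hsmall' : ∀ d : Int, 2 ≤ d → d < p + 1 → ¬ d ∣ stripFac p m m.toNat := by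
            intro d h1 h2 hds
            rcases lt_or_eq_of_le (by omega : d ≤ p) with hlt | rfl
            · exact hsmall d h1 hlt (hds.trans hsm)
            · exact hs3 ((PySem.Int.mod_eq_zero_iff_dvd _ d).mpr hds)
          have hbig' : ∀ x : Int, p + 1 ≤ x → isPrimeA x = true →
              (x ∣ n ↔ x ∣ stripFac p m m.toNat) := by
            intro x hx hxp
            rw [hbig x (by omega) hxp]
            constructor
            · intro hxm
              have hxprime : Prime x := primeInt_of_isPrimeA hxp
              rw [hse] at hxm
              rcases hxprime.dvd_mul.mp hxm with hcase | hcase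
              · exfalso
                have hxdp : x ∣ p := hxprime.dvd_of_dvd_pow hcase
                have := Int.le_of_dvd (by omega) hxdp
                omega
              · exact hcase
            · intro hxs
              exact hxs.trans hsm
          rw [trailB, dif_pos hpm, if_pos hdv, hrange, List.filter_cons, if_pos hpred]
          have hrec := ih (p + 1) (stripFac p m m.toNat) (by omega) hs1
            (hsm.trans hmn) hsmall' hbig' (by omega)
          rw [hrec, show p + 1 - 1 = p by ring]
        · have hpred : ¬ predP n p = true := by
            intro hpr
            exact hdv ((PySem.Int.mod_eq_zero_iff_dvd m p).mpr (hnopred p (le_refl p) hpr))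
          have hsmall' : ∀ d : Int, 2 ≤ d → d < p + 1 → ¬ d ∣ m := by
            intro d h1 h2 hds
            rcases lt_or_eq_of_le (by omega : d ≤ p) with hlt | rfl
            · exact hsmall d h1 hlt hds
            · exact hdv ((PySem.Int.mod_eq_zero_iff_dvd m d).mpr hds)
          have hbig' : ∀ x : Int, p + 1 ≤ x → isPrimeA x = true → (x ∣ n ↔ x ∣ m) :=
            fun x hx hxp => hbig x (by omega) hxp
          rw [trailB, dif_pos hpm, if_neg hdv, hrange, List.filter_cons, if_neg hpred]
          have hrec := ih (p + 1) m (by omega) hm hmn hsmall' hbig' (by omega)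
          rw [hrec, show p + 1 - 1 = p by ring]
      · have hm1 : m = 1 := by
          by_contra hc
          exact hsmall m (by omega) (by omega) dvd_rfl
        rw [trailB, dif_neg hpm]
        symm
        rw [List.filter_eq_nil_iff]
        intro x hx hpr
        rw [mem_myRange] at hx
        have hxm : x ∣ m := hnopred x (by omega) hpr
        have hx2 : 2 ≤ x := by
          simp only [predP, Bool.and_eq_true] at hpr
          exact isPrimeA_two_le hpr.1
        have := Int.le_of_dvd (by omega) hxm
        omega

-- every n ≥ 2 contributes at least one sequence element
theorem filter_ne_nil (n : Int) (hn : 2 ≤ n) :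
    (myRange 1 n).filter (predP n) ≠ [] := by
  have hn2 : 2 ≤ n.toNat := by omega
  set q := n.toNat.minFac with hqdef
  have hq : Nat.Prime q := Nat.minFac_prime (by omega)
  have hdvd : (q : Int) ∣ n := by
    have : (q : Int) ∣ (n.toNat : Int) := Int.natCast_dvd_natCast.mpr (Nat.minFac_dvd _)
    rwa [Int.toNat_of_nonneg (by omega)] at this
  have hq2 : 2 ≤ (q : Int) := by exact_mod_cast hq.two_le
  have hqle : (q : Int) ≤ n := Int.le_of_dvd (by omega) hdvd
  have hmem : (q : Int) ∈ myRange 1 n := mem_myRange.mpr ⟨by omega, hqle⟩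
  have hprime : isPrimeA (q : Int) = true := by
    rw [isPrimeA_iff_prime _ hq2]
    simpa using hq
  have hpred : predP n (q : Int) = true := by
    simp only [predP, Bool.and_eq_true, hprime, true_and, beq_iff_eq]
    exact (PySem.Int.mod_eq_zero_iff_dvd n _).mpr hdvd
  exact List.ne_nil_of_mem (List.mem_filter.mpr ⟨hmem, hpred⟩)

theorem outer_eq (fuel : Nat) : ∀ (k n : Int), 1 ≤ k → k.toNat ≤ fuel → 2 ≤ n →
    outerA fuel n k = outerB fuel n k := by
  induction fuel with
  | zero =>
      intro k n hk hf hn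
      exact absurd hf (by omega)
  | succ fuel ih =>
      intro k n hk hf hn
      have hT : trailB 2 n = (myRange 1 n).filter (predP n) := by
        rw [trailB_eq_filter 2 n n (by omega) (by omega) (by omega) dvd_rfl
          (fun d h1 h2 => False.elim (by omega)) (fun x _ _ => Iff.rfl),
          show (2:Int) - 1 = 1 by ring]
      have hA : innerA n 1 k ((n + 1).toNat + 1) =
          consumeL ((myRange 1 n).filter (predP n)) k := by
        rw [innerA_eq_consume n 1 k (by omega) (by omega) _ (by omega), chainA_eq_filter]
      have hB : innerB 2 n k ((n + 1).toNat) =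
          consumeL ((myRange 1 n).filter (predP n)) k := by
        rw [innerB_eq_consume 2 n k (by omega) _ (by omega), hT]
      have hlen : 1 ≤ ((myRange 1 n).filter (predP n)).length := by
        cases hL : (myRange 1 n).filter (predP n) with
        | nil => exact absurd hL (filter_ne_nil n hn)
        | cons a t => simp
      rw [outerA, outerB]
      split
      · rename_i a hEq
        have hca : consumeL ((myRange 1 n).filter (predP n)) k = .inl a := by
          rw [← hA, hEq]
        split
        · rename_i b hEq2
          have hcb : consumeL ((myRange 1 n).filter (predP n)) k = .inl b := by
            rw [← hB, hEq2]
          rw [hca] at hcb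
          exact (Sum.inl.injEq _ _).mp hcb
        · rename_i k2 hEq2
          have hcb : consumeL ((myRange 1 n).filter (predP n)) k = .inr k2 := by
            rw [← hB, hEq2]
          rw [hca] at hcb
          exact absurd hcb (by simp)
      · rename_i k1 hEq
        have hca : consumeL ((myRange 1 n).filter (predP n)) k = .inr k1 := by
          rw [← hA, hEq]
        split
        · rename_i b hEq2
          have hcb : consumeL ((myRange 1 n).filter (predP n)) k = .inl b := by
            rw [← hB, hEq2]
          rw [hca] at hcb
          exact absurd hcb (by simp)
        · rename_i k2 hEq2
          have hcb : consumeL ((myRange 1 n).filter (predP n)) k = .inr k2 := by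
            rw [← hB, hEq2]
          rw [hca] at hcb
          have hk12 : k1 = k2 := (Sum.inr.injEq _ _).mp hcb
          obtain ⟨h1, h2⟩ := consumeL_inr hk hca
          subst hk12
          exact ih k1 (n + 1) h2 (by omega) (by omega)

-- ===== VERDICT (by name: the statement is the Claim_ definition above) =====
theorem generateTheNthElementOfTheSequence_spec : Claim_equal_generateTheNthElementOfTheSequence := by
  intro k _ hpre
  unfold Spec_generateTheNthElementOfTheSequence
  unfold generateTheNthElementOfTheSequence generateTheNthElementOfTheSequence_alt
  unfold Pre_generateTheNthElementOfTheSequence at hpre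
  by_cases h1 : k = 1
  · simp [h1]
  · rw [if_neg h1, if_neg h1,
      outer_eq (k - 1).toNat (k - 1) 2 (by omega) (le_refl _) (by omega)]
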